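-- pv_equiv track=rewrite | github.com/abhi11/propositional_prover | prover.py | check_basic_sanity
-- ===== SOURCE A (Python) =====
-- OPENING_BRACKET = '('
--
-- CLOSING_BRACKET = ')'
--
-- def check_basic_sanity(F):
--     '''
--     Number of OPENING and CLOSING  brackets should be equal
--     Returns False if not
--     Also checks if there's any special character, if present returns False
--     '''
--     op = 0
--     cl = 0
--     for c in F:
--         if c == ' ':
--             continue
--
--         # no special characters allowed
--         if c != OPENING_BRACKET and c != CLOSING_BRACKET and (not c.isalnum()):
--             return False
--
--         if c == OPENING_BRACKET:
--             op = op + 1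
--
--         if c == CLOSING_BRACKET:
--             cl = cl + 1
--
--     return (cl == op)
-- ===== SOURCE B (Python) =====
-- OPENING_BRACKET = '('
--
-- CLOSING_BRACKET = ')'
--
-- def check_basic_sanity(F):
--     return (all(c == ' ' or c == OPENING_BRACKET or c == CLOSING_BRACKET or c.isalnum() for c in F)
--             and F.count(OPENING_BRACKET) == F.count(CLOSING_BRACKET))
-- ===== Notes on version B (the rewrite author's own statement) =====
-- stated objective: idiomatic
-- what changed: Replaces A's single fused loop (two bracket counters plus an early return on a bad character) with two separated concerns: an all(...) validity scan over the characters, conjoined with a comparison of two independent str.count scans for the opening and closing brackets.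
import Mathlib
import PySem

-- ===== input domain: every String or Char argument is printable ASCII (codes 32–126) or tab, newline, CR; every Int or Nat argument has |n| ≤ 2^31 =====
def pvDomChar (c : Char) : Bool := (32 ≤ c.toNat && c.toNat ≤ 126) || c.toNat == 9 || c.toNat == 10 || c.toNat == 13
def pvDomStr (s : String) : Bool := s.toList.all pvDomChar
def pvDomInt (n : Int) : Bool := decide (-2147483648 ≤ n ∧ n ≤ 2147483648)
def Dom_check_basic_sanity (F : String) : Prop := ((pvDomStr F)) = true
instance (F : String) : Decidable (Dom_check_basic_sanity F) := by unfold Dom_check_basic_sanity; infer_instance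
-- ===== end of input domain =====

-- B replaces A's fused counting loop with one validity scan plus two independent F.count scans (idiomatic decomposition).

-- ===== PORT A =====
def OPENING_BRACKET : Char := '('
def CLOSING_BRACKET : Char := ')'

-- the 'for c in F' loop of A, with its two counters and early 'return False'
def checkA_go : List Char → Int → Int → Bool
  | [], op, cl => cl == op
  | c :: rest, op, cl =>
    if c = ' ' then checkA_go rest op cl
    else if c ≠ OPENING_BRACKET ∧ c ≠ CLOSING_BRACKET ∧ ¬ (PySem.Chars.isalnum c = true) then
      false
    else
      checkA_go rest
        (if c = OPENING_BRACKET then op + 1 else op)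
        (if c = CLOSING_BRACKET then cl + 1 else cl)

def check_basic_sanity (F : String) : Bool := checkA_go F.toList 0 0

-- ===== PORT B =====
def check_basic_sanity_alt (F : String) : Bool :=
  (F.toList.all fun c =>
      c == ' ' || c == OPENING_BRACKET || c == CLOSING_BRACKET || PySem.Chars.isalnum c)
  && (PySem.Str.count F "(" == PySem.Str.count F ")")

-- ===== PRECONDITION & SPEC =====
def Spec_check_basic_sanity (F : String) (out : Bool) : Prop := out = check_basic_sanity_alt F
instance (F : String) (out : Bool) : Decidable (Spec_check_basic_sanity F out) := by unfold Spec_check_basic_sanity; infer_instance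

-- ===== CLAIM (what is proved, stated in full; the proofs are below) =====
def Claim_equal_check_basic_sanity : Prop := ∀ (F : String), Dom_check_basic_sanity F → Spec_check_basic_sanity F (check_basic_sanity F)

-- ===== LEMMAS AND PROOFS =====

-- a char A's loop accepts (the spaces branch or the not-special branch)
def okChar (c : Char) : Bool :=
  c == ' ' || c == OPENING_BRACKET || c == CLOSING_BRACKET || PySem.Chars.isalnum c

-- invariant of A's loop: it is the validity scan plus a bracket-count comparison
theorem checkA_go_eq (l : List Char) : ∀ op cl : Int,
    checkA_go l op cl =
      (l.all okChar && ((cl + (l.count ')' : Int)) == (op + (l.count '(' : Int)))) := by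
  induction l with
  | nil => intro op cl; simp [checkA_go]
  | cons c rest ih =>
    intro op cl
    by_cases hs : c = ' '
    · subst hs
      simp [checkA_go, okChar, ih]
    · by_cases hb : c ≠ OPENING_BRACKET ∧ c ≠ CLOSING_BRACKET ∧ ¬ (PySem.Chars.isalnum c = true)
      · obtain ⟨h1, h2, h3⟩ := hb
        have : okChar c = false := by
          simp [okChar, hs, h1, h2, h3]
        simp [checkA_go, hs, h1, h2, h3, List.all_cons, this]
      · have hok : okChar c = true := by
          unfold okChar
          rcases not_and_or.mp hb with h | h
          · simp at h; simp [h]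
          · rcases not_and_or.mp h with h' | h'
            · simp at h'; simp [h']
            · simp at h'; simp [h']
        rw [checkA_go]
        rw [if_neg hs, if_neg hb, ih]
        simp only [List.all_cons, hok, Bool.true_and, List.count_cons]
        congr 1
        rw [Bool.eq_iff_iff]
        simp only [beq_iff_eq, OPENING_BRACKET, CLOSING_BRACKET]
        by_cases ho : c = '(' <;> by_cases hc2 : c = ')' <;>
          (try simp_all) <;> omega

-- F.count(c) for a single char is the char count of the list
theorem count_go_singleton (c : Char) : ∀ (s : List Char) (fuel acc : Nat),
    s.length ≤ fuel → PySem.Chars.count.go [c] fuel s acc = acc + s.count c := by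
  intro s
  induction s with
  | nil => intro fuel acc _; cases fuel <;> simp [PySem.Chars.count.go]
  | cons h t ih =>
    intro fuel acc hle
    cases fuel with
    | zero => simp at hle
    | succ n =>
      rw [PySem.Chars.count.go]
      by_cases hc : h = c
      · subst hc
        have hp : List.isPrefixOf [h] (h :: t) = true := by simp [List.isPrefixOf]
        simp only [hp, if_true, List.length_singleton, List.drop_succ_cons, List.drop_zero]
        rw [ih n (acc + 1) (by simpa using hle)]
        simp
        omega
      · have hp : List.isPrefixOf [c] (h :: t) = false := by
          simp [List.isPrefixOf, Ne.symm hc]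
        simp only [hp, Bool.false_eq_true, if_false]
        rw [ih n acc (by simpa using hle)]
        simp [hc]

theorem count_singleton (s : List Char) (c : Char) :
    PySem.Chars.count s [c] = s.count c := by
  simp only [PySem.Chars.count, List.isEmpty_cons, Bool.false_eq_true, if_false]
  simpa using count_go_singleton c s s.length 0 le_rfl

-- ===== VERDICT (by name: the statement is the Claim_ definition above) =====
theorem check_basic_sanity_spec : Claim_equal_check_basic_sanity := by
  intro F _
  unfold Spec_check_basic_sanity check_basic_sanity check_basic_sanity_alt
  rw [checkA_go_eq]
  have h1 : PySem.Str.count F "(" = F.toList.count '(' := by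
    simpa using count_singleton F.toList '('
  have h2 : PySem.Str.count F ")" = F.toList.count ')' := by
    simpa using count_singleton F.toList ')'
  rw [h1, h2]
  rw [Bool.eq_iff_iff]
  simp only [Bool.and_eq_true, beq_iff_eq, okChar, List.all_eq_true]
  constructor <;> rintro ⟨ha, hb⟩ <;> exact ⟨ha, by omega⟩
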